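-- pv_equiv track=rewrite | github.com/jorodgrz/GW_Formation_Channels_ML | pipelines/data_alignment/gwtc4_loader.py | _extract_event_name
-- ===== SOURCE A (Python) =====
-- from typing import Dict, List, Optional, Sequence, Tuple
--
-- def _extract_event_name(filename: str) -> Optional[str]:
--     if "GW" not in filename:
--         return None
--
--     parts = filename.replace(".hdf5", "").split("-")
--     candidates = [part for part in parts if part.startswith("GW")]
--     if not candidates:
--         return None
--
--     digit_pref = [
--         part for part in candidates
--         if len(part) > 2 and part[2].isdigit()
--     ]
--     if digit_pref:
--         return digit_pref[0]
--     for part in candidates: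
--         remainder = part[2:]
--         if remainder and any(ch.isdigit() for ch in remainder):
--             return part
--     return candidates[0]
-- ===== SOURCE B (Python) =====
-- def _extract_event_name(filename):
--     if "GW" not in filename:
--         return None
--
--     def _priority(part):
--         if len(part) > 2 and part[2].isdigit():
--             return 0
--         if any(ch.isdigit() for ch in part[2:]):
--             return 1
--         return 2
--
--     best = None
--     for part in filename.replace(".hdf5", "").split("-"):
--         if not part.startswith("GW"):
--             continue
--         p = _priority(part)
--         if best is None or p < best[1]:
--             best = (part, p)
--     return best[0] if best is not None else None
-- ===== Notes on version B (the rewrite author's own statement) =====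
-- stated objective: simpler
-- what changed: Replaces A's three staged passes over the candidate list (digit-prefix filter, digit-anywhere scan, fallback to the first candidate) with a single pass that scores each part with a 3-tier priority function and keeps the first candidate of lowest tier, never materialising the candidate lists.
import Mathlib
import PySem

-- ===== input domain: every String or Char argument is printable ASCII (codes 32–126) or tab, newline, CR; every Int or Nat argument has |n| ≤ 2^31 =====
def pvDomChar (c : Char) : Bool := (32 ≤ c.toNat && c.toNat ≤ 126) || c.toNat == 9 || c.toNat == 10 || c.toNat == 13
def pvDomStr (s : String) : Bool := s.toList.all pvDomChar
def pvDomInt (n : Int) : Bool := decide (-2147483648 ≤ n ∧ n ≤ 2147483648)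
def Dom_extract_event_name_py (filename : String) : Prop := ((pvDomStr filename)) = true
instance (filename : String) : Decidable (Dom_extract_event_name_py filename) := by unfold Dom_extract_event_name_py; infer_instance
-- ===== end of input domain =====

-- B replaces A's three staged passes with one scoring pass (first candidate of lowest priority tier); same cost, simpler control flow.

-- ===== PORT A =====
-- len(part) > 2 and part[2].isdigit()
def pvTier0 (part : String) : Bool :=
  decide (2 < PySem.Str.len part) &&
    (match PySem.Str.pyGet? part 2 with
     | some c => PySem.Chars.isdigit c
     | none => false)

-- remainder = part[2:];  remainder and any(ch.isdigit() for ch in remainder)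
def pvTier1 (part : String) : Bool :=
  let remainder := PySem.Str.slice part (some 2) none
  (!(remainder == "")) && remainder.toList.any PySem.Chars.isdigit

-- the 'for part in candidates: … return part' loop
def pvLoopA : List String → Option String
  | [] => none
  | part :: rest => if pvTier1 part then some part else pvLoopA rest

def extract_event_name_py (filename : String) : Option String :=
  if !PySem.Str.isIn "GW" filename then none
  else
    let parts := (PySem.Str.split? (PySem.Str.replace filename ".hdf5" "") "-").getD []
    let candidates := parts.filter (fun part => PySem.Str.startswith part "GW")
    match candidates with
    | [] => none
    | c0 :: _ =>
      match candidates.filter pvTier0 with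
      | d :: _ => some d
      | [] =>
        match pvLoopA candidates with
        | some p => some p
        | none => some c0

-- ===== PORT B =====
-- B's _priority helper
def pvPri (part : String) : Nat :=
  if decide (2 < PySem.Str.len part) &&
      (match PySem.Str.pyGet? part 2 with
       | some c => PySem.Chars.isdigit c
       | none => false) then 0
  else if (PySem.Str.slice part (some 2) none).toList.any PySem.Chars.isdigit then 1
  else 2

-- one iteration of B's loop
def pvStep (best : Option (String × Nat)) (part : String) : Option (String × Nat) :=
  if !PySem.Str.startswith part "GW" then best
  else
    match best with
    | none => some (part, pvPri part)
    | some (b, bp) => if pvPri part < bp then some (part, pvPri part) else some (b, bp)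

def extract_event_name_py_alt (filename : String) : Option String :=
  if !PySem.Str.isIn "GW" filename then none
  else
    match ((PySem.Str.split? (PySem.Str.replace filename ".hdf5" "") "-").getD []).foldl pvStep none with
    | none => none
    | some (b, _) => some b

-- ===== PRECONDITION & SPEC =====
def Spec_extract_event_name_py (filename : String) (out : Option String) : Prop := out = extract_event_name_py_alt filename
instance (filename : String) (out : Option String) : Decidable (Spec_extract_event_name_py filename out) := by unfold Spec_extract_event_name_py; infer_instance

-- ===== CLAIM (what is proved, stated in full; the proofs are below) =====
def Claim_equal_extract_event_name_py : Prop := ∀ (filename : String), Dom_extract_event_name_py filename → Spec_extract_event_name_py filename (extract_event_name_py filename)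

-- ===== LEMMAS AND PROOFS =====

-- B's loop body once the startswith guard has passed
def pvSimp (best : Option (String × Nat)) (part : String) : Option (String × Nat) :=
  match best with
  | none => some (part, pvPri part)
  | some (b, bp) => if pvPri part < bp then some (part, pvPri part) else some (b, bp)

lemma pvPri_le_two (x : String) : pvPri x ≤ 2 := by
  unfold pvPri; split_ifs <;> omega

lemma pvPri_eq_zero_iff (x : String) : pvPri x = 0 ↔ pvTier0 x = true := by
  unfold pvPri pvTier0
  split_ifs with h1 h2
  · exact iff_of_true rfl h1
  · exact iff_of_false (by decide) h1
  · exact iff_of_false (by decide) h1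

lemma slice_two_toList (x : String) :
    (PySem.Str.slice x (some 2) none).toList = x.toList.drop 2 := by
  simpa using PySem.List.slice_from_natCast (xs := x.toList) (a := 2)

lemma pvTier0_imp_any (x : String) (h : pvTier0 x = true) :
    (PySem.Str.slice x (some 2) none).toList.any PySem.Chars.isdigit = true := by
  unfold pvTier0 at h
  simp at h
  obtain ⟨hl, hm⟩ := h
  have hl' : 2 < x.toList.length := by simpa using hl
  rw [show PySem.List.pyGet? x.toList 2 = some (x.toList[2]'hl') by
        simp [PySem.List.pyGet?, PySem.List.pyIdx?, hl, hl',
          List.getElem?_eq_getElem]] at hm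
  rw [slice_two_toList, List.any_eq_true]
  refine ⟨x.toList[2]'hl', ?_, by simpa using hm⟩
  have h0 : (x.toList.drop 2)[0]'(by simp; omega) = x.toList[2]'hl' := by
    simp [List.getElem_drop]
  rw [← h0]
  exact List.getElem_mem _
lemma pvTier1_eq (x : String) :
    pvTier1 x = ((!(PySem.Str.slice x (some 2) none == "")) &&
      (PySem.Str.slice x (some 2) none).toList.any PySem.Chars.isdigit) := rfl

lemma pvTier1_iff (x : String) : pvTier1 x = true ↔ pvPri x ≤ 1 := by
  by_cases hA : (PySem.Str.slice x (some 2) none).toList.any PySem.Chars.isdigit = true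
  · have hne : (PySem.Str.slice x (some 2) none) ≠ "" := by
      intro he
      rw [he] at hA
      simp at hA
    have hE : ((PySem.Str.slice x (some 2) none) == "") = false := by
      simpa using hne
    constructor
    · intro _
      unfold pvPri
      split_ifs <;> omega
    · intro _
      rw [pvTier1_eq, hE, hA]
      rfl
  · have hA' : (PySem.Str.slice x (some 2) none).toList.any PySem.Chars.isdigit = false := by
      revert hA; cases (PySem.Str.slice x (some 2) none).toList.any PySem.Chars.isdigit <;> simp
    have h0 : pvTier0 x = false := by
      by_contra hc
      have : pvTier0 x = true := by revert hc; cases pvTier0 x <;> simp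
      exact hA (pvTier0_imp_any x this)
    have hp2 : pvPri x = 2 := by
      unfold pvPri
      unfold pvTier0 at h0
      rw [h0, hA']
      rfl
    constructor
    · intro ht
      rw [pvTier1_eq, hA'] at ht
      simp at ht
    · intro hle; omega
  
lemma pvLoopA_eq_find? (l : List String) : pvLoopA l = l.find? pvTier1 := by
  induction l with
  | nil => rfl
  | cons h t ih => simp only [pvLoopA, List.find?]; split <;> simp_all

lemma find?_congr_mem {α : Type} (p q : α → Bool) (l : List α)
    (h : ∀ x ∈ l, p x = q x) : l.find? p = l.find? q := by
  induction l with
  | nil => rfl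
  | cons a t ih =>
    have ha := h a (by simp)
    simp only [List.find?, ha]
    split
    · rfl
    · exact ih (fun x hx => h x (by simp [hx]))

lemma head?_filter {α : Type} (p : α → Bool) (l : List α) :
    (l.filter p).head? = l.find? p := by
  induction l with
  | nil => rfl
  | cons a t ih =>
    by_cases ha : p a = true <;> simp [List.filter_cons, List.find?, ha, ih]

lemma foldl_skip (parts : List String) (acc : Option (String × Nat)) :
    parts.foldl pvStep acc
      = (parts.filter (fun p => PySem.Str.startswith p "GW")).foldl pvSimp acc := by
  induction parts generalizing acc with
  | nil => rfl
  | cons h t ih =>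
    cases hs : PySem.Str.startswith h "GW" with
    | false =>
      have hstep : pvStep acc h = acc := by unfold pvStep; rw [hs]; rfl
      simp only [List.foldl_cons, List.filter_cons, hs, Bool.false_eq_true, if_false, hstep]
      exact ih acc
    | true =>
      have hstep : pvStep acc h = pvSimp acc h := by unfold pvStep pvSimp; rw [hs]; rfl
      simp only [List.foldl_cons, List.filter_cons, hs, if_true, hstep]
      exact ih _

lemma fold0 (cs : List String) (b : String) :
    cs.foldl pvSimp (some (b, 0)) = some (b, 0) := by
  induction cs with
  | nil => rfl
  | cons h t ih => simp [pvSimp, ih]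

lemma fold1 (cs : List String) (b : String) :
    cs.foldl pvSimp (some (b, 1))
      = match cs.find? (fun x => pvPri x == 0) with
        | some x => some (x, 0)
        | none => some (b, 1) := by
  induction cs with
  | nil => rfl
  | cons h t ih =>
    by_cases h0 : pvPri h = 0
    · simp [pvSimp, List.find?, h0, fold0]
    · have hlt : ¬ pvPri h < 1 := by omega
      simp only [List.foldl_cons, List.find?, pvSimp, if_neg hlt]
      rw [ih]
      have : (pvPri h == 0) = false := by simpa using h0
      rw [this]

lemma fold2 (cs : List String) (b : String) :
    cs.foldl pvSimp (some (b, 2))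
      = match cs.find? (fun x => pvPri x == 0) with
        | some x => some (x, 0)
        | none =>
          match cs.find? (fun x => pvPri x == 1) with
          | some y => some (y, 1)
          | none => some (b, 2) := by
  induction cs with
  | nil => rfl
  | cons h t ih =>
    by_cases h0 : pvPri h = 0
    · simp [pvSimp, List.find?, h0, fold0]
    · by_cases h1p : pvPri h = 1
      · have hlt : pvPri h < 2 := by omega
        simp only [List.foldl_cons, pvSimp, h1p]
        rw [if_pos (by norm_num : (1:Nat) < 2), fold1]
        have e0 : (pvPri h == 0) = false := by simp [h1p]
        have e1 : (pvPri h == 1) = true := by simp [h1p]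
        simp only [List.find?, e0, e1]
      · have h2 : pvPri h = 2 := by have := pvPri_le_two h; omega
        have hlt : ¬ pvPri h < 2 := by omega
        simp only [List.foldl_cons, pvSimp, if_neg hlt]
        rw [ih]
        have e0 : (pvPri h == 0) = false := by simp [h0]
        have e1 : (pvPri h == 1) = false := by simp [h1p]
        simp only [List.find?, e0, e1]

lemma tier0_pri_pointwise (x : String) : pvTier0 x = (pvPri x == 0) := by
  by_cases h : pvTier0 x = true
  · simp [h, (pvPri_eq_zero_iff x).2 h]
  · have hf : pvTier0 x = false := by revert h; cases pvTier0 x <;> simp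
    have : pvPri x ≠ 0 := fun hc => h ((pvPri_eq_zero_iff x).1 hc)
    simp [hf]
    omega

-- the body of both functions, on the already-split parts list, agree
lemma body_eq (parts : List String) :
    (match parts.filter (fun part => PySem.Str.startswith part "GW") with
     | [] => (none : Option String)
     | c0 :: _ =>
       match (parts.filter (fun part => PySem.Str.startswith part "GW")).filter pvTier0 with
       | d :: _ => some d
       | [] =>
         match pvLoopA (parts.filter (fun part => PySem.Str.startswith part "GW")) with
         | some p => some p
         | none => some c0)
    = (match parts.foldl pvStep none with
       | none => none
       | some (b, _) => some b) := by
  rw [foldl_skip]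
  set cs := parts.filter (fun part => PySem.Str.startswith part "GW") with hcs
  clear hcs
  cases cs with
  | nil => rfl
  | cons c0 rest =>
    have hstep : (c0 :: rest).foldl pvSimp none = rest.foldl pvSimp (some (c0, pvPri c0)) := rfl
    have hfind0 : ((c0 :: rest).filter pvTier0).head?
        = (c0 :: rest).find? (fun x => pvPri x == 0) := by
      rw [head?_filter]
      exact find?_congr_mem _ _ _ (fun x _ => tier0_pri_pointwise x)
    by_cases hp : pvPri c0 = 0
    · -- priority 0 head: first tier-0 candidate is c0
      rw [hstep, hp, fold0]
      have h0 : (c0 :: rest).find? (fun x => pvPri x == 0) = some c0 := by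
        simp [List.find?, hp]
      rw [h0] at hfind0
      rcases hf : (c0 :: rest).filter pvTier0 with _ | ⟨d, _⟩
      · rw [hf] at hfind0; simp at hfind0
      · rw [hf] at hfind0; simp at hfind0; simp [hfind0]
    · by_cases hp1 : pvPri c0 = 1
      · -- priority 1 head
        rw [hstep, hp1, fold1]
        have ht1 : pvTier1 c0 = true := (pvTier1_iff c0).2 (by omega)
        have h0 : (c0 :: rest).find? (fun x => pvPri x == 0)
            = rest.find? (fun x => pvPri x == 0) := by
          have e0 : (pvPri c0 == 0) = false := by simp [hp]
          simp [List.find?, e0]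
        cases hr : rest.find? (fun x => pvPri x == 0) with
        | some x =>
          rw [h0, hr] at hfind0
          rcases hf : (c0 :: rest).filter pvTier0 with _ | ⟨d, _⟩
          · rw [hf] at hfind0; simp at hfind0
          · rw [hf] at hfind0; simp at hfind0; simp [hfind0]
        | none =>
          rw [h0, hr] at hfind0
          rcases hf : (c0 :: rest).filter pvTier0 with _ | ⟨d, _⟩
          · simp [pvLoopA, ht1]
          · rw [hf] at hfind0; simp at hfind0
      · -- priority 2 head
        have h2 : pvPri c0 = 2 := by have := pvPri_le_two c0; omega
        rw [hstep, h2, fold2]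
        have ht1 : pvTier1 c0 = false := by
          by_contra hc
          have := (pvTier1_iff c0).1 (by revert hc; cases pvTier1 c0 <;> simp)
          omega
        have e0 : (pvPri c0 == 0) = false := by simp [hp]
        have e1 : (pvPri c0 == 1) = false := by simp [hp1]
        have h0 : (c0 :: rest).find? (fun x => pvPri x == 0)
            = rest.find? (fun x => pvPri x == 0) := by simp [List.find?, e0]
        have hloop : pvLoopA (c0 :: rest) = pvLoopA rest := by simp [pvLoopA, ht1]
        cases hr0 : rest.find? (fun x => pvPri x == 0) with
        | some x =>
          rw [h0, hr0] at hfind0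
          rcases hf : (c0 :: rest).filter pvTier0 with _ | ⟨d, _⟩
          · rw [hf] at hfind0; simp at hfind0
          · rw [hf] at hfind0; simp at hfind0; simp [hfind0]
        | none =>
          rw [h0, hr0] at hfind0
          rcases hf : (c0 :: rest).filter pvTier0 with _ | ⟨d, _⟩
          swap
          · rw [hf] at hfind0; simp at hfind0
          · -- no tier-0 candidate anywhere
            have hmem : ∀ x ∈ rest, pvTier1 x = (pvPri x == 1) := by
              intro x hx
              have hne0' : pvPri x ≠ 0 := by
                have := List.find?_eq_none.mp hr0 x hx
                simpa using this
              by_cases htx : pvTier1 x = true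
              · have hle := (pvTier1_iff x).1 htx
                have hx1 : pvPri x = 1 := by omega
                simp [htx, hx1]
              · have htx' : pvTier1 x = false := by revert htx; cases pvTier1 x <;> simp
                have hgt : ¬ pvPri x ≤ 1 := fun hle => htx ((pvTier1_iff x).2 hle)
                have hx1 : pvPri x ≠ 1 := by omega
                simp [htx']
                omega
            have hloopf : pvLoopA rest = rest.find? (fun x => pvPri x == 1) := by
              rw [pvLoopA_eq_find?]
              exact find?_congr_mem _ _ _ hmem
            rw [hloop, hloopf]
            cases hr1 : rest.find? (fun x => pvPri x == 1) <;> rfl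

-- ===== VERDICT (by name: the statement is the Claim_ definition above) =====
theorem extract_event_name_py_spec : Claim_equal_extract_event_name_py := by
  intro filename _hdom
  unfold Spec_extract_event_name_py extract_event_name_py extract_event_name_py_alt
  cases hg : PySem.Str.isIn "GW" filename with
  | false => rfl
  | true =>
    simp only [Bool.not_true, Bool.false_eq_true, if_false]
    generalize (PySem.Str.split? (PySem.Str.replace filename ".hdf5" "") "-").getD [] = ps
    exact body_eq ps
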